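-- pv_equiv track=rewrite | github.com/bartolomej/fri-programming-1 | topovske_bitke.py | direkten_napad
-- ===== SOURCE A (Python) =====
-- def se_napadata(top1, top2):
--     return (top1[0] == top2[0] or top1[1] == top2[1]) and top1 != top2
--
-- def direkten_napad(top1, top2, topovi):
--     # preveri ali sta topa sploh poravnana po vrsticah ali stolpah
--     if not se_napadata(top1, top2):
--         return False
--     col_sort = [top1, top2]
--     col_sort.sort(key=lambda x: x[0])
--     row_sort = [top1, top2]
--     row_sort.sort(key=lambda x: x[1])
--     for t in topovi:
--         if ((t[0] == top1[0] == top2[0] and row_sort[0][1] < t[1] < row_sort[1][1]) or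
--                 (t[1] == top1[1] == top2[1] and col_sort[0][0] < t[0] < col_sort[1][0])):
--             return False
--     return True
-- ===== SOURCE B (Python) =====
-- def prosta_crta(a, b, coords):
--     # the segment (a,b) is free iff a and b are ADJACENT in the sorted distinct
--     # set of occupied coordinates on the line (plus the two endpoints themselves)
--     lo, hi = min(a, b), max(a, b)
--     line = sorted(set(coords + [lo, hi]))
--     return line.index(hi) == line.index(lo) + 1
--
-- def direkten_napad(top1, top2, topovi):
--     if top1 == top2:
--         return False
--     if top1[0] == top2[0]:
--         return prosta_crta(top1[1], top2[1], [t[1] for t in topovi if t[0] == top1[0]])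
--     if top1[1] == top2[1]:
--         return prosta_crta(top1[0], top2[0], [t[0] for t in topovi if t[1] == top1[1]])
--     return False
-- ===== Notes on version B (the rewrite author's own statement) =====
-- stated objective: alternative
-- what changed: B replaces A's linear scan of topovi with a compound two-orientation blocking condition by a sort-based algorithm: it collects the occupied coordinates on the shared line, sorts them as a set together with the two endpoints, and answers by testing that the endpoints are adjacent in that sorted distinct list.
import Mathlib
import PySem

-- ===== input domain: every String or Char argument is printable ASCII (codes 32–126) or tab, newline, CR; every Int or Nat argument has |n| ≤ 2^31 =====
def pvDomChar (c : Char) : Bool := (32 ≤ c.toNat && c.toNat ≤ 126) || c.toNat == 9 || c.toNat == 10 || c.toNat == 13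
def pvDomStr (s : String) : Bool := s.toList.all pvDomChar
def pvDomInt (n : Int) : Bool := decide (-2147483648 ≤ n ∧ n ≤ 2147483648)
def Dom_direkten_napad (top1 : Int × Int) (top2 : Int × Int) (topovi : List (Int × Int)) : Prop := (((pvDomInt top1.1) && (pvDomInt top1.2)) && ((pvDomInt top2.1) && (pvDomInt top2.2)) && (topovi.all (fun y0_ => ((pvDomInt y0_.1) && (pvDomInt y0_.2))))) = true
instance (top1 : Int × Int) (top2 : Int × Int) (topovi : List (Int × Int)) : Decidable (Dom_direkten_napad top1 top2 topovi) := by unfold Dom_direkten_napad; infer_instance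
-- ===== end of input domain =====

-- B replaces A's linear scan of topovi (with a compound two-orientation blocking
-- condition over two pre-sorted pairs) by a sort-based algorithm: collect the occupied
-- coordinates on the shared line as a set, sort them together with the two endpoints,
-- and test that the endpoints are ADJACENT in that sorted distinct list (objective: alternative).

-- ===== PORT A =====
def se_napadata (top1 top2 : Int × Int) : Bool :=
  (top1.1 == top2.1 || top1.2 == top2.2) && top1 != top2

-- the `for t in topovi: if …: return False` loop of A, with the four sorted endpoints as state
def direkten_napad_go (top1 top2 cs0 cs1 rs0 rs1 : Int × Int) : List (Int × Int) → Bool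
  | [] => true
  | t :: rest =>
    if (t.1 == top1.1 && top1.1 == top2.1 && decide (rs0.2 < t.2) && decide (t.2 < rs1.2)) ||
       (t.2 == top1.2 && top1.2 == top2.2 && decide (cs0.1 < t.1) && decide (t.1 < cs1.1)) then
      false
    else direkten_napad_go top1 top2 cs0 cs1 rs0 rs1 rest

def direkten_napad (top1 : Int × Int) (top2 : Int × Int) (topovi : List (Int × Int)) : Bool :=
  if !se_napadata top1 top2 then false
  else
    let col_sort := PySem.List.sorted [top1, top2] (fun x => x.1) false
    let row_sort := PySem.List.sorted [top1, top2] (fun x => x.2) false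
    -- indices 0 and 1 on these two-element lists never raise; pyGetD's default is unreachable
    direkten_napad_go top1 top2
      (PySem.List.pyGetD col_sort 0 (0, 0)) (PySem.List.pyGetD col_sort 1 (0, 0))
      (PySem.List.pyGetD row_sort 0 (0, 0)) (PySem.List.pyGetD row_sort 1 (0, 0)) topovi

-- ===== PORT B =====
def prosta_crta (a b : Int) (coords : List Int) : Bool :=
  let lo := min a b
  let hi := max a b
  let line := PySem.List.sorted (PySem.Set.ofList (coords ++ [lo, hi])) (fun x => x) false
  -- lo and hi are always members of line, so line.index never raises; getD's default is unreachable
  ((PySem.List.index? line hi).getD 0 == (PySem.List.index? line lo).getD 0 + 1)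

def direkten_napad_alt (top1 : Int × Int) (top2 : Int × Int) (topovi : List (Int × Int)) : Bool :=
  if top1 == top2 then false
  else if top1.1 == top2.1 then
    prosta_crta top1.2 top2.2 ((topovi.filter (fun t => t.1 == top1.1)).map (fun t => t.2))
  else if top1.2 == top2.2 then
    prosta_crta top1.1 top2.1 ((topovi.filter (fun t => t.2 == top1.2)).map (fun t => t.1))
  else false

-- ===== PRECONDITION & SPEC =====
def Spec_direkten_napad (top1 : Int × Int) (top2 : Int × Int) (topovi : List (Int × Int)) (out : Bool) : Prop := out = direkten_napad_alt top1 top2 topovi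
instance (top1 : Int × Int) (top2 : Int × Int) (topovi : List (Int × Int)) (out : Bool) : Decidable (Spec_direkten_napad top1 top2 topovi out) := by unfold Spec_direkten_napad; infer_instance

-- ===== CLAIM (what is proved, stated in full; the proofs are below) =====
def Claim_equal_direkten_napad : Prop := ∀ (top1 : Int × Int) (top2 : Int × Int) (topovi : List (Int × Int)), Dom_direkten_napad top1 top2 topovi → Spec_direkten_napad top1 top2 topovi (direkten_napad top1 top2 topovi)

-- ===== LEMMAS AND PROOFS =====

-- in a strictly sorted list containing hi, hi is at index 0 iff nothing is below hi
theorem index_zero_iff_min (L : List Int) (hL : L.Pairwise (· < ·)) (hi : Int) (hhi : hi ∈ L) :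
    (PySem.List.index? L hi = some 0) ↔ ∀ c ∈ L, ¬ (c < hi) := by
  cases L with
  | nil => simp at hhi
  | cons y ys =>
    rcases List.pairwise_cons.mp hL with ⟨hy, _⟩
    by_cases hyh : y = hi
    · subst hyh
      rw [PySem.List.index?_cons_self]
      simp only [true_iff]
      intro c hc
      rcases List.mem_cons.mp hc with rfl | hc
      · omega
      · exact fun h => absurd (hy c hc) (by omega)
    · rw [PySem.List.index?_cons_of_ne ys hyh]
      constructor
      · intro h; exfalso
        rcases Option.map_eq_some_iff.mp h with ⟨k, _, hk⟩; omega
      · intro h; exfalso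
        rcases List.mem_cons.mp hhi with rfl | hmem
        · exact hyh rfl
        · exact h y (List.mem_cons_self) (hy hi hmem)

-- adjacency of lo and hi in a strictly sorted list ↔ nothing of the list strictly between them
theorem adjacent_iff_none_between (L : List Int) (hL : L.Pairwise (· < ·)) (lo hi : Int)
    (hlt : lo < hi) (hlo : lo ∈ L) (hhi : hi ∈ L) :
    ((PySem.List.index? L hi).getD 0 == (PySem.List.index? L lo).getD 0 + 1) =
      !(L.any fun c => decide (lo < c) && decide (c < hi)) := by
  induction L with
  | nil => simp at hlo
  | cons x xs ih =>
    rcases List.pairwise_cons.mp hL with ⟨hx, hxs⟩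
    by_cases hxlo : x = lo
    · subst hxlo
      have hhix : hi ∈ xs := by
        rcases List.mem_cons.mp hhi with rfl | h; · omega
        · exact h
      rw [PySem.List.index?_cons_self, PySem.List.index?_cons_of_ne xs (by omega)]
      obtain ⟨k, hk⟩ := Option.isSome_iff_exists.mp ((PySem.List.index?_isSome_iff xs hi).mpr hhix)
      rw [hk]
      simp only [Option.map_some, Option.getD_some, List.any_cons]
      have h0 : (decide (x < x) && decide (x < hi)) = false := by simp
      rw [h0, Bool.false_or]
      have : (xs.any fun c => decide (x < c) && decide (c < hi)) =
          (xs.any fun c => decide (c < hi)) := by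
        rw [Bool.eq_iff_iff]; simp only [List.any_eq_true]
        constructor
        · rintro ⟨c, hc, hp⟩; exact ⟨c, hc, by simpa using (Bool.and_eq_true_iff.mp hp).2⟩
        · rintro ⟨c, hc, hp⟩; exact ⟨c, hc, by simp [hx c hc, hp]⟩
      rw [this]
      by_cases hany : ∃ c ∈ xs, c < hi
      · have h1 : (xs.any fun c => decide (c < hi)) = true := by
          rcases hany with ⟨c, hc, hch⟩
          exact List.any_eq_true.mpr ⟨c, hc, by simpa using hch⟩
        rw [h1]
        have : PySem.List.index? xs hi ≠ some 0 := by
          intro h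
          rcases hany with ⟨c, hc, hch⟩
          exact (index_zero_iff_min xs hxs hi hhix).mp h c hc hch
        rw [hk] at this
        simp only [Bool.not_true]
        have : k ≠ 0 := fun h => this (by rw [h])
        simp; omega
      · have h1 : (xs.any fun c => decide (c < hi)) = false := by
          rw [List.any_eq_false]; intro c hc; simpa using fun h => hany ⟨c, hc, h⟩
        rw [h1]
        have : PySem.List.index? xs hi = some 0 :=
          (index_zero_iff_min xs hxs hi hhix).mpr (fun c hc hch => hany ⟨c, hc, hch⟩)
        rw [hk] at this
        have : k = 0 := by injection this
        simp [this]
    · have hlo' : lo ∈ xs := by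
        rcases List.mem_cons.mp hlo with rfl | h; · exact absurd rfl hxlo
        · exact h
      have hxlt : x < lo := hx lo hlo'
      have hhi' : hi ∈ xs := by
        rcases List.mem_cons.mp hhi with rfl | h; · omega
        · exact h
      rw [PySem.List.index?_cons_of_ne xs (show x ≠ hi by omega),
          PySem.List.index?_cons_of_ne xs (show x ≠ lo by omega)]
      obtain ⟨k, hk⟩ := Option.isSome_iff_exists.mp ((PySem.List.index?_isSome_iff xs hi).mpr hhi')
      obtain ⟨j, hj⟩ := Option.isSome_iff_exists.mp ((PySem.List.index?_isSome_iff xs lo).mpr hlo')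
      have hrec := ih hxs hlo' hhi'
      rw [hk, hj] at hrec ⊢
      simp only [Option.map_some, Option.getD_some, List.any_cons] at *
      have h0 : (decide (lo < x) && decide (x < hi)) = false := by simp; omega
      rw [h0, Bool.false_or, ← hrec]
      simp

-- prosta_crta is exactly "no coordinate strictly between a and b"
theorem prosta_crta_eq (a b : Int) (hab : a ≠ b) (coords : List Int) :
    prosta_crta a b coords =
      !(coords.any fun c => decide (min a b < c) && decide (c < max a b)) := by
  unfold prosta_crta
  have hlt : min a b < max a b := by omega
  set L := PySem.List.sorted (PySem.Set.ofList (coords ++ [min a b, max a b])) (fun x => x) false with hLdef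
  have hL : L.Pairwise (· < ·) := PySem.List.sorted_ofList_pairwise_lt _
  have hmem : ∀ c : Int, c ∈ L ↔ c ∈ coords ∨ c = min a b ∨ c = max a b := by
    intro c
    rw [hLdef, PySem.List.mem_sorted, PySem.Set.mem_ofList]
    simp
  have hlo : min a b ∈ L := (hmem _).mpr (Or.inr (Or.inl rfl))
  have hhi : max a b ∈ L := (hmem _).mpr (Or.inr (Or.inr rfl))
  rw [adjacent_iff_none_between L hL _ _ hlt hlo hhi]
  congr 1
  rw [Bool.eq_iff_iff]
  simp only [List.any_eq_true]
  constructor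
  · rintro ⟨c, hc, hp⟩
    rcases (hmem c).mp hc with h | rfl | rfl
    · exact ⟨c, h, hp⟩
    · simp at hp
    · simp at hp
  · rintro ⟨c, hc, hp⟩
    exact ⟨c, (hmem c).mpr (Or.inl hc), hp⟩

theorem sorted_pair (a b : Int × Int) (k : Int × Int → Int) :
    PySem.List.sorted [a, b] k false = if k b < k a then [b, a] else [a, b] := by
  rcases lt_or_ge (k b) (k a) with h | h
  · simp [PySem.List.sorted, PySem.List.insertBy, h]
  · simp [PySem.List.sorted, PySem.List.insertBy, not_lt.mpr h]

theorem go_eq_not_any (top1 top2 cs0 cs1 rs0 rs1 : Int × Int) (xs : List (Int × Int)) :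
    direkten_napad_go top1 top2 cs0 cs1 rs0 rs1 xs =
      !(xs.any fun t =>
        (t.1 == top1.1 && top1.1 == top2.1 && decide (rs0.2 < t.2) && decide (t.2 < rs1.2)) ||
        (t.2 == top1.2 && top1.2 == top2.2 && decide (cs0.1 < t.1) && decide (t.1 < cs1.1))) := by
  induction xs with
  | nil => rfl
  | cons t rest ih =>
    simp only [direkten_napad_go, List.any_cons]
    split_ifs with h
    · simp [h]
    · simp [h, ih]

theorem direkten_napad_spec_aux (top1 top2 : Int × Int) (topovi : List (Int × Int)) :
    direkten_napad top1 top2 topovi = direkten_napad_alt top1 top2 topovi := by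
  unfold direkten_napad direkten_napad_alt se_napadata
  by_cases heq : top1 = top2
  · simp [heq]
  · by_cases hr : top1.1 = top2.1
    · have hc : top1.2 ≠ top2.2 := fun hc => heq (Prod.ext hr hc)
      rw [prosta_crta_eq _ _ hc]
      rcases lt_trichotomy top1.2 top2.2 with h | h | h
      · simp [go_eq_not_any, sorted_pair, heq, hr, not_lt.mpr (le_of_lt h),
          min_eq_left (le_of_lt h), max_eq_right (le_of_lt h), PySem.List.pyGetD,
          List.any_filter, List.any_map, Function.comp_def]
        congr 1; funext t; simp [hc, Bool.and_assoc]
      · exact absurd h hc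
      · simp [go_eq_not_any, sorted_pair, heq, hr, h,
          min_eq_right (le_of_lt h), max_eq_left (le_of_lt h), PySem.List.pyGetD,
          List.any_filter, List.any_map, Function.comp_def]
        congr 1; funext t; simp [hc, Bool.and_assoc]
    · by_cases hcol : top1.2 = top2.2
      · rw [prosta_crta_eq _ _ (fun h => hr h)]
        rcases lt_trichotomy top1.1 top2.1 with h | h | h
        · simp [go_eq_not_any, sorted_pair, heq, hr, hcol, not_lt.mpr (le_of_lt h),
            min_eq_left (le_of_lt h), max_eq_right (le_of_lt h), PySem.List.pyGetD,
            List.any_filter, List.any_map, Function.comp_def]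
          congr 1; funext t; simp [hr, Bool.and_assoc]
        · exact absurd h hr
        · simp [go_eq_not_any, sorted_pair, heq, hr, hcol, h,
            min_eq_right (le_of_lt h), max_eq_left (le_of_lt h), PySem.List.pyGetD,
            List.any_filter, List.any_map, Function.comp_def]
          congr 1; funext t; simp [hr, Bool.and_assoc]
      · simp [heq, hr, hcol]

-- ===== VERDICT (by name: the statement is the Claim_ definition above) =====
theorem direkten_napad_spec : Claim_equal_direkten_napad := by
  intro top1 top2 topovi _
  exact direkten_napad_spec_aux top1 top2 topovi
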